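-- pv_equiv track=rewrite | github.com/weiyangzen/awesome_algorithms | Algorithms/数学-算法-0043-Schönhage-Strassen算法/demo.py | _carry_propagate
-- ===== SOURCE A (Python) =====
-- from typing import Dict, List, Sequence, Tuple
--
-- def _carry_propagate(coeffs: Sequence[int], limb_bits: int) -> List[int]:
--     base = 1 << limb_bits
--     mask = base - 1
--
--     out: List[int] = []
--     carry = 0
--     for c in coeffs:
--         v = c + carry
--         out.append(v & mask)
--         carry = v >> limb_bits
--
--     while carry:
--         out.append(carry & mask)
--         carry >>= limb_bits
--
--     while len(out) > 1 and out[-1] == 0: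
--         out.pop()
--
--     return out
-- ===== SOURCE B (Python) =====
-- from typing import List, Sequence
--
--
-- def _carry_propagate(coeffs: Sequence[int], limb_bits: int) -> List[int]:
--     # Evaluate the whole polynomial at 2**limb_bits (Horner), then peel limbs off it.
--     if not coeffs:
--         return []
--     total = 0
--     for c in reversed(coeffs):
--         total = (total << limb_bits) + c
--     if total == 0:
--         return [0]
--     mask = (1 << limb_bits) - 1
--     limbs: List[int] = []
--     while total:
--         limbs.append(total & mask)
--         total >>= limb_bits
--     return limbs
-- ===== Notes on version B (the rewrite author's own statement) =====
-- stated objective: alternative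
-- what changed: A propagates a carry digit-by-digit through the coefficient list and then trims trailing zeros; B first evaluates the whole polynomial at 2**limb_bits with Horner's rule and then peels the limbs off that single integer, so no carry variable and no trimming pass exist.
import Mathlib
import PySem

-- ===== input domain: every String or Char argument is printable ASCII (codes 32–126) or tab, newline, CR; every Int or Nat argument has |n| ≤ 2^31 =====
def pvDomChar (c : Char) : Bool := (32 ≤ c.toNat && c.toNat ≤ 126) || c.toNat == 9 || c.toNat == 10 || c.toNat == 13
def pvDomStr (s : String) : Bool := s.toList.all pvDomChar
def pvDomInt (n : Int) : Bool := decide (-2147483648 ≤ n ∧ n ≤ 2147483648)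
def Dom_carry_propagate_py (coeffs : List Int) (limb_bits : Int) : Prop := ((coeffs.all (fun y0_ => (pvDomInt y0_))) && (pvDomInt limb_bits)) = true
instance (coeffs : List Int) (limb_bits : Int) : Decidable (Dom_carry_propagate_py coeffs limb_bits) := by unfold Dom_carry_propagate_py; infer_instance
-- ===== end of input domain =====

-- B replaces A's per-coefficient carry bookkeeping by one Horner evaluation of the whole
-- polynomial at 2^limb_bits followed by a single limb-peeling loop (objective: alternative).

-- ===== PORT A =====
-- 'for c in coeffs: v = c + carry; out.append(v & mask); carry = v >> limb_bits'
def pvLoopA (b : Nat) (mask : Int) : List Int → Int → List Int → (List Int × Int)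
  | [], carry, out => (out, carry)
  | c :: cs, carry, out =>
      let v := c + carry
      pvLoopA b mask cs (v >>> b) (out ++ [PySem.Int.band v mask])

-- 'while carry: out.append(carry & mask); carry >>= limb_bits' — fuel-guarded; on every
-- input where this Python loop terminates, carry.natAbs + 1 steps of fuel suffice.
def pvPeelA (b : Nat) (mask : Int) : Nat → Int → List Int → List Int
  | 0, _, out => out
  | fuel + 1, carry, out =>
      if carry = 0 then out
      else pvPeelA b mask fuel (carry >>> b) (out ++ [PySem.Int.band carry mask])

-- 'while len(out) > 1 and out[-1] == 0: out.pop()'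
def pvTrimA (out : List Int) : List Int :=
  if 1 < out.length ∧ out.getLast? = some 0 then pvTrimA out.dropLast else out
termination_by out.length
decreasing_by simp [List.length_dropLast]; omega

def carry_propagate_py (coeffs : List Int) (limb_bits : Int) : List Int :=
  -- Python raises on '1 << limb_bits' for limb_bits < 0: excluded by Pre_.
  let b := limb_bits.toNat
  let base : Int := (1 : Int) <<< b
  let mask := base - 1
  let p := pvLoopA b mask coeffs 0 []
  pvTrimA (pvPeelA b mask (p.2.natAbs + 1) p.2 p.1)

-- ===== PORT B =====
-- 'while total: limbs.append(total & mask); total >>= limb_bits' — fuel-guarded as above.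
def pvPeelB (b : Nat) (mask : Int) : Nat → Int → List Int → List Int
  | 0, _, limbs => limbs
  | fuel + 1, total, limbs =>
      if total = 0 then limbs
      else pvPeelB b mask fuel (total >>> b) (limbs ++ [PySem.Int.band total mask])

def carry_propagate_py_alt (coeffs : List Int) (limb_bits : Int) : List Int :=
  if coeffs = [] then []
  else
    let b := limb_bits.toNat
    let total := coeffs.reverse.foldl (fun (t c : Int) => (t <<< b) + c) (0 : Int)
    if total = 0 then [0]
    else
      let mask : Int := ((1 : Int) <<< b) - 1
      pvPeelB b mask (total.natAbs + 1) total []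

-- ===== PRECONDITION & SPEC =====
-- pvSgn b cs is a stand-in for the total integer value sum cs[i] * 2^(b*i) the coefficient
-- list denotes: it is that value itself while it fits below 2^63 and a saturated ±(2^63 + 1)
-- once its magnitude is known to exceed 2^63 (for b = 0 it is always the exact value, i.e. the
-- plain sum), so it always has the SAME SIGN as the true total (proved below, pv_sgn_nonneg /
-- pv_sgn_zero) but deciding Pre_ never materialises 2^limb_bits-sized integers.
def pvM : Int := 2 ^ 63

def pvClamp (x : Int) : Int :=
  if pvM < x then pvM + 1 else if x < -pvM then -(pvM + 1) else x

def pvStep (b : Nat) (s c : Int) : Int :=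
  if b = 0 then s + c
  else if s = 0 then c
  else if b ≤ 64 then pvClamp (s * 2 ^ b + c)
  else if 0 < s then pvM + 1 else -(pvM + 1)

def pvSgn (b : Nat) (cs : List Int) : Int := cs.foldr (fun c s => pvStep b s c) 0

-- Exactly the inputs on which A returns: limb_bits < 0 makes '1 << limb_bits' raise
-- ValueError; a negative total value makes A's 'while carry' loop spin forever (the carry
-- stays negative, '>>' never clears it), and so does limb_bits = 0 with a nonzero total
-- ('carry >>= 0' never changes the carry). So: limb_bits ≥ 0, total ≥ 0, and total = 0
-- when limb_bits = 0 — with the total's sign read off pvSgn (see its comment).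
def Pre_carry_propagate_py (coeffs : List Int) (limb_bits : Int) : Prop :=
  0 ≤ limb_bits ∧ 0 ≤ pvSgn limb_bits.toNat coeffs ∧ (limb_bits = 0 → pvSgn 0 coeffs = 0)
instance (coeffs : List Int) (limb_bits : Int) : Decidable (Pre_carry_propagate_py coeffs limb_bits) := by unfold Pre_carry_propagate_py; infer_instance

def pvWitness_carry_propagate_py : List Int × Int := ([3, -1, 5], 2)

def Spec_carry_propagate_py (coeffs : List Int) (limb_bits : Int) (out : List Int) : Prop := out = carry_propagate_py_alt coeffs limb_bits
instance (coeffs : List Int) (limb_bits : Int) (out : List Int) : Decidable (Spec_carry_propagate_py coeffs limb_bits out) := by unfold Spec_carry_propagate_py; infer_instance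

-- ===== CLAIM (what is proved, stated in full; the proofs are below) =====
def Claim_equal_carry_propagate_py : Prop := ∀ (coeffs : List Int) (limb_bits : Int), Dom_carry_propagate_py coeffs limb_bits → Pre_carry_propagate_py coeffs limb_bits → Spec_carry_propagate_py coeffs limb_bits (carry_propagate_py coeffs limb_bits)

-- ===== LEMMAS AND PROOFS =====

-- pvVal b coeffs is the integer the coefficient list denotes: sum coeffs[i] * 2^(b*i).
def pvVal (b : Nat) : List Int → Int
  | [] => 0
  | c :: cs => c + 2 ^ b * pvVal b cs

-- for b = 0 pvSgn is exactly the value (the plain sum)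
theorem pv_sgn_zero (cs : List Int) : pvSgn 0 cs = pvVal 0 cs := by
  induction cs with
  | nil => rfl
  | cons c cs ih =>
      show pvStep 0 (pvSgn 0 cs) c = pvVal 0 (c :: cs)
      simp [pvStep, pvVal, ih]; ring

theorem pv_clamp_rep (x : Int) :
    (pvClamp x = x ∧ -pvM ≤ x ∧ x ≤ pvM) ∨ (pvClamp x = pvM + 1 ∧ pvM < x) ∨
      (pvClamp x = -(pvM + 1) ∧ x < -pvM) := by
  unfold pvClamp pvM; split_ifs <;> simp_all

-- one pvStep preserves the saturated-representation invariant
theorem pv_step_rep (b : Nat) (hb : 1 ≤ b) (s V c : Int)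
    (hc1 : -2147483648 ≤ c) (hc2 : c ≤ 2147483648)
    (h : (s = V ∧ -pvM ≤ s ∧ s ≤ pvM) ∨ (s = pvM + 1 ∧ pvM < V) ∨
      (s = -(pvM + 1) ∧ V < -pvM)) :
    (pvStep b s c = c + 2 ^ b * V ∧ -pvM ≤ pvStep b s c ∧ pvStep b s c ≤ pvM) ∨
      (pvStep b s c = pvM + 1 ∧ pvM < c + 2 ^ b * V) ∨
      (pvStep b s c = -(pvM + 1) ∧ c + 2 ^ b * V < -pvM) := by
  have hMv : pvM = 9223372036854775808 := by norm_num [pvM]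
  have h2b : (2 : Int) ≤ 2 ^ b := by
    calc (2 : Int) = 2 ^ 1 := by norm_num
    _ ≤ 2 ^ b := by apply pow_le_pow_right₀ <;> omega
  unfold pvStep
  rw [if_neg (by omega : ¬ b = 0)]
  by_cases hs : s = 0
  · have hV : V = 0 := by rcases h with ⟨h1, _⟩ | ⟨h1, _⟩ | ⟨h1, _⟩ <;> omega
    rw [if_pos hs]
    subst hV
    exact Or.inl ⟨by ring, by omega, by omega⟩
  · rw [if_neg hs]
    by_cases hb64 : b ≤ 64
    · rw [if_pos hb64]
      rcases h with ⟨h1, h2, h3⟩ | ⟨h1, h2⟩ | ⟨h1, h2⟩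
      · subst h1
        have hcomm : s * 2 ^ b = 2 ^ b * s := mul_comm s _
        have := pv_clamp_rep (s * 2 ^ b + c)
        rcases this with ⟨e, l1, l2⟩ | ⟨e, l⟩ | ⟨e, l⟩
        · left; rw [e]; constructor
          · ring
          · omega
        · right; left; rw [e]; constructor
          · rfl
          · omega
        · right; right; rw [e]; constructor
          · rfl
          · omega
      · -- s saturated positive: V > pvM, so the new value stays above pvM
        have hsb : 2 * (pvM + 1) ≤ (pvM + 1) * 2 ^ b := by nlinarith
        have hVb : 2 * V ≤ 2 ^ b * V := by nlinarith
        right; left; constructor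
        · subst h1
          unfold pvClamp
          rw [if_pos (by omega)]
        · omega
      · have hsb : (-(pvM + 1)) * 2 ^ b ≤ 2 * (-(pvM + 1)) := by nlinarith
        have hVb : 2 ^ b * V ≤ 2 * V := by nlinarith
        right; right; constructor
        · subst h1
          unfold pvClamp
          rw [if_neg (by omega), if_pos (by omega)]
        · omega
    · rw [if_neg hb64]
      have h65 : (2 : Int) ^ 65 ≤ 2 ^ b := by apply pow_le_pow_right₀ <;> omega
      have h65v : (2 : Int) ^ 65 = 36893488147419103232 := by norm_num
      rcases h with ⟨h1, _, _⟩ | ⟨h1, h2⟩ | ⟨h1, h2⟩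
      · subst h1
        by_cases hpos : 0 < s
        · have : 2 ^ 65 * 1 ≤ 2 ^ b * s := by
            apply mul_le_mul h65 (by omega) (by norm_num) (by positivity)
          right; left; rw [if_pos hpos]; omega
        · have hneg : s < 0 := by omega
          have : 2 ^ b * s ≤ 2 ^ 65 * s := by nlinarith
          have : 2 ^ 65 * s ≤ 2 ^ 65 * (-1) := by nlinarith
          right; right; rw [if_neg (by omega)]; omega
      · have : 2 ^ 65 * 1 ≤ 2 ^ b * V := by
          apply mul_le_mul h65 (by omega) (by norm_num) (by positivity)
        right; left; rw [if_pos (by omega)]; omega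
      · have h1' : 2 ^ b * V ≤ 2 ^ 65 * V := by nlinarith
        have h2' : 2 ^ 65 * V ≤ 2 ^ 65 * (-1) := by nlinarith
        right; right; rw [if_neg (by omega)]; omega

-- pvSgn represents pvVal: equal while small, saturated with the right sign once big
theorem pv_sgn_rep (b : Nat) (hb : 1 ≤ b) (cs : List Int)
    (hdom : ∀ c ∈ cs, -2147483648 ≤ c ∧ c ≤ 2147483648) :
    (pvSgn b cs = pvVal b cs ∧ -pvM ≤ pvSgn b cs ∧ pvSgn b cs ≤ pvM) ∨
      (pvSgn b cs = pvM + 1 ∧ pvM < pvVal b cs) ∨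
      (pvSgn b cs = -(pvM + 1) ∧ pvVal b cs < -pvM) := by
  induction cs with
  | nil =>
      left
      refine ⟨rfl, ?_, ?_⟩ <;> norm_num [pvSgn, pvM]
  | cons c cs ih =>
      obtain ⟨hc1, hc2⟩ := hdom c (List.mem_cons_self)
      have ih' := ih (fun x hx => hdom x (List.mem_cons_of_mem _ hx))
      have step := pv_step_rep b hb (pvSgn b cs) (pvVal b cs) c hc1 hc2 ih'
      show (pvStep b (pvSgn b cs) c = pvVal b (c :: cs) ∧ _) ∨ _
      simpa [pvVal] using step

theorem pv_sgn_nonneg (b : Nat) (hb : 1 ≤ b) (cs : List Int)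
    (hdom : ∀ c ∈ cs, -2147483648 ≤ c ∧ c ≤ 2147483648)
    (hs : 0 ≤ pvSgn b cs) : 0 ≤ pvVal b cs := by
  have hMv : pvM = 9223372036854775808 := by norm_num [pvM]
  rcases pv_sgn_rep b hb cs hdom with ⟨h1, _, _⟩ | ⟨_, h2⟩ | ⟨h1, _⟩ <;> omega

-- base-2^b digits of a nonnegative integer, low to high (no trailing zero digit)
def pvDig (b : Nat) (T : Int) : List Int := (Nat.digits (2 ^ b) T.toNat).map Int.ofNat

-- the n lowest base-2^b digits of T, as Python's '& mask' / '>> b' compute them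
def pvLow (b : Nat) : Nat → Int → List Int
  | 0, _ => []
  | n + 1, T => T % 2 ^ b :: pvLow b n (T / 2 ^ b)

-- Python's 'x & (2^b - 1)' is x mod 2^b (also for negative x)
theorem pv_band_mask (x : Int) (b : Nat) : PySem.Int.band x (2 ^ b - 1) = x % 2 ^ b := by
  have h2 : (1:Int) ≤ 2 ^ b := one_le_pow₀ (by norm_num)
  have hm : ((2:Int) ^ b - 1) = ((2 ^ b - 1 : Nat) : Int) := by
    push_cast [Nat.one_le_two_pow]; ring
  rw [PySem.Int.band]
  by_cases hx : 0 ≤ x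
  · simp only [hx, if_true, show (0:Int) ≤ 2^b - 1 by omega, if_true]
    rw [hm, Int.toNat_natCast, Nat.and_two_pow_sub_one_eq_mod]
    conv_rhs => rw [show x = ((x.toNat : Int)) from (Int.toNat_of_nonneg hx).symm]
    exact Int.natCast_emod _ _
  · simp only [hx, if_false, show (0:Int) ≤ 2^b - 1 by omega, if_true]
    rw [hm, Int.toNat_natCast, Nat.and_comm, Nat.and_two_pow_sub_one_eq_mod]
    set y : Nat := (-x - 1).toNat with hy
    have hxy : x = -(y : Int) - 1 := by
      have : ((-x - 1).toNat : Int) = -x - 1 := Int.toNat_of_nonneg (by omega)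
      omega
    have hmod : ((y % 2 ^ b : Nat) : Int) = ((y : Int) % 2 ^ b) := by
      rw [Int.natCast_emod]; norm_cast
    have hemod_nonneg := Int.emod_nonneg (y : Int) (show (2:Int)^b ≠ 0 by omega)
    have hemod_lt := Int.emod_lt_of_pos (y : Int) (show (0:Int) < 2^b by omega)
    have hx2 : x % 2 ^ b = (2 ^ b - 1 - (y : Int) % 2 ^ b) := by
      have hdecomp : x = (2 ^ b - 1 - (y : Int) % 2 ^ b) + 2 ^ b * (-(((y:Int)) / 2 ^ b) - 1) := by
        have h := Int.emod_add_mul_ediv (y : Int) (2 ^ b)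
        rw [hxy]
        linear_combination h
      rw [hdecomp, Int.add_mul_emod_self_left]
      exact Int.emod_eq_of_lt (by omega) (by omega)
    have hyle : y % 2 ^ b ≤ 2 ^ b - 1 := by
      have : y % 2 ^ b < 2 ^ b := Nat.mod_lt _ (by positivity)
      omega
    rw [hx2, Nat.cast_sub hyle, hmod, ← hm]

theorem pv_dig_cons (b : Nat) (hb : 0 < b) (T : Int) (hT : 0 < T) :
    pvDig b T = (T % 2 ^ b) :: pvDig b (T / 2 ^ b) := by
  have h2 : (1:Nat) < 2 ^ b := by
    have := Nat.one_lt_two_pow_iff (n := b); omega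
  have e0 : ((T.toNat : Int)) = T := Int.toNat_of_nonneg (by omega)
  have e1 : T % 2 ^ b = ((T.toNat % 2 ^ b : Nat) : Int) := by
    rw [Int.natCast_emod, e0]; push_cast; ring
  have e2 : T / 2 ^ b = ((T.toNat / 2 ^ b : Nat) : Int) := by
    rw [Int.natCast_ediv, e0]; push_cast; ring
  rw [pvDig, Nat.digits_def' h2 (by omega), List.map_cons]
  congr 1
  · rw [Int.ofNat_eq_natCast, ← e1]
  · rw [pvDig, e2, Int.toNat_natCast]

-- A's for-loop computes the cs.length lowest digits of (value + incoming carry)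
-- and leaves the rest as the carry
theorem pv_loopA_eq (b : Nat) (cs : List Int) (carry : Int) (out : List Int) :
    pvLoopA b ((2 ^ b : Int) - 1) cs carry out =
      (out ++ pvLow b cs.length (pvVal b cs + carry),
       (pvVal b cs + carry) / (2 ^ b : Int) ^ cs.length) := by
  induction cs generalizing carry out with
  | nil => simp [pvLoopA, pvLow, pvVal]
  | cons c cs ih =>
      have hN : (0:Int) < 2 ^ b := by positivity
      simp only [pvLoopA, ih, List.length_cons, pvVal, pvLow]
      rw [Int.shiftRight_eq_div_pow, pv_band_mask]
      push_cast
      have hmod : (c + 2 ^ b * pvVal b cs + carry) % 2 ^ b = (c + carry) % 2 ^ b := by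
        conv_lhs => rw [show c + 2 ^ b * pvVal b cs + carry
          = (c + carry) + 2 ^ b * pvVal b cs by ring]
        exact Int.add_mul_emod_self_left ..
      have hdiv : (c + 2 ^ b * pvVal b cs + carry) / 2 ^ b = pvVal b cs + (c + carry) / 2 ^ b := by
        conv_lhs => rw [show c + 2 ^ b * pvVal b cs + carry
          = (c + carry) + (2:Int) ^ b * pvVal b cs by ring]
        rw [Int.add_mul_ediv_left _ _ (by omega : (2:Int)^b ≠ 0)]
        ring
      rw [hmod, hdiv, pow_succ]
      rw [show ((2:Int)^b)^cs.length * 2^b = 2^b * ((2:Int)^b)^cs.length by ring]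
      rw [← Int.ediv_ediv_of_nonneg (le_of_lt hN), hdiv]
      simp [List.append_assoc]

theorem pv_low_zero (b : Nat) (n : Nat) : pvLow b n 0 = List.replicate n 0 := by
  induction n with
  | zero => rfl
  | succ n ih => simp [pvLow, ih, List.replicate_succ]

-- the 'while carry' loop appends exactly the digit list of a nonnegative carry
theorem pv_peelA_eq (b : Nat) (hb : 0 < b) (fuel : Nat) (T : Int) (acc : List Int)
    (hT : 0 ≤ T) (hf : T.natAbs < fuel) :
    pvPeelA b ((2 ^ b : Int) - 1) fuel T acc = acc ++ pvDig b T := by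
  induction fuel generalizing T acc with
  | zero => omega
  | succ f ih =>
      have hN : (1:Int) < 2 ^ b := by
        calc (1:Int) < 2 ^ 1 := by norm_num
        _ ≤ 2 ^ b := by apply pow_le_pow_right₀ <;> omega
      by_cases h0 : T = 0
      · simp [pvPeelA, h0, pvDig]
      · have hTpos : 0 < T := lt_of_le_of_ne hT (Ne.symm h0)
        have hlt : T / 2 ^ b < T := by
          apply Int.ediv_lt_of_lt_mul (by omega)
          nlinarith
        have hge : 0 ≤ T / 2 ^ b := Int.ediv_nonneg hT (by omega)
        simp only [pvPeelA, h0, if_false]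
        rw [Int.shiftRight_eq_div_pow, pv_band_mask]
        push_cast
        rw [ih _ _ hge (by omega), pv_dig_cons b hb T hTpos]
        simp [List.append_assoc]

theorem pv_peelB_eq_peelA (b : Nat) (m : Int) (fuel : Nat) (T : Int) (acc : List Int) :
    pvPeelB b m fuel T acc = pvPeelA b m fuel T acc := by
  induction fuel generalizing T acc with
  | zero => rfl
  | succ f ih => simp only [pvPeelB, pvPeelA]; split <;> simp [ih]

-- low digits plus digits of the shifted-off part = all digits, zero-padded to length n
theorem pv_low_append_dig (b : Nat) (hb : 0 < b) (n : Nat) (T : Int) (hT : 0 ≤ T) :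
    pvLow b n T ++ pvDig b (T / (2 ^ b : Int) ^ n) =
      pvDig b T ++ List.replicate (n - (pvDig b T).length) 0 := by
  induction n generalizing T with
  | zero => simp [pvLow, pvDig]
  | succ n ih =>
      have hN : (1:Int) < 2 ^ b := by
        calc (1:Int) < 2 ^ 1 := by norm_num
        _ ≤ 2 ^ b := by apply pow_le_pow_right₀ <;> omega
      by_cases h0 : T = 0
      · subst h0
        simp [pv_low_zero, pvDig, List.replicate_succ]
      · have hTpos : 0 < T := lt_of_le_of_ne hT (Ne.symm h0)
        have hge : 0 ≤ T / 2 ^ b := Int.ediv_nonneg hT (by omega)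
        have hch : T / (2 ^ b : Int) ^ (n + 1) = (T / 2 ^ b) / (2 ^ b : Int) ^ n := by
          rw [pow_succ, show ((2:Int)^b)^n * 2^b = 2^b * ((2:Int)^b)^n by ring,
            ← Int.ediv_ediv_of_nonneg (by omega)]
        rw [pvLow, hch, List.cons_append, ih _ hge, pv_dig_cons b hb T hTpos]
        simp [List.length_cons]

-- popping trailing zeros from a zero-padded list whose core has no trailing zero
theorem pv_trim_pad (k : Nat) (L : List Int) (hL : L.getLast? ≠ some 0) :
    pvTrimA (L ++ List.replicate k 0) =
      if L = [] then (if k = 0 then [] else [0]) else L := by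
  induction k with
  | zero =>
      rw [pvTrimA, if_neg (by simp [hL])]
      simp only [List.replicate_zero, List.append_nil]
      split
      · next h => simp [h]
      · rfl
  | succ k ih =>
      by_cases hsmall : L = [] ∧ k = 0
      · obtain ⟨h1, h2⟩ := hsmall; subst h1; subst h2
        rw [pvTrimA]; simp
      · have hlast : (L ++ List.replicate (k+1) 0).getLast? = some 0 := by
          rw [List.getLast?_append_of_ne_nil]
          · simp [List.getLast?_replicate]
          · simp
        have hlen : 1 < (L ++ List.replicate (k+1) 0).length := by
          simp only [List.length_append, List.length_replicate]
          rcases Nat.eq_zero_or_pos L.length with h | h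
          · have hL0 : L = [] := List.eq_nil_of_length_eq_zero h
            have : k ≠ 0 := fun hk => hsmall ⟨hL0, hk⟩
            omega
          · omega
        have hdrop : (L ++ List.replicate (k+1) 0).dropLast = L ++ List.replicate k 0 := by
          rw [show List.replicate (k+1) (0:Int) = List.replicate k 0 ++ [0] by
            simp [List.replicate_succ']]
          rw [← List.append_assoc, List.dropLast_concat]
        rw [pvTrimA, if_pos ⟨hlen, hlast⟩, hdrop, ih]
        by_cases hL0 : L = []
        · have hk : k ≠ 0 := fun hk => hsmall ⟨hL0, hk⟩
          simp [hL0, hk]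
        · simp [hL0]

theorem pv_dig_last (b : Nat) (T : Int) : (pvDig b T).getLast? ≠ some 0 := by
  rw [pvDig]
  by_cases hz : T.toNat = 0
  · simp [hz]
  · have hne : Nat.digits (2 ^ b) T.toNat ≠ [] := Nat.digits_ne_nil_iff_ne_zero.mpr hz
    have hlast := Nat.getLast_digit_ne_zero (2 ^ b) hz
    rw [List.getLast?_map, List.getLast?_eq_some_getLast hne]
    simp only [Option.map_some, Int.ofNat_eq_natCast, Ne, Option.some.injEq]
    exact_mod_cast hlast

theorem pv_horner (b : Nat) (cs : List Int) :
    cs.reverse.foldl (fun (t c : Int) => (t <<< b) + c) (0 : Int) = pvVal b cs := by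
  rw [List.foldl_reverse]
  induction cs with
  | nil => rfl
  | cons c cs ih =>
      simp only [List.foldr_cons, pvVal, Int.shiftLeft_eq] at ih ⊢
      rw [ih]; ring

-- the degenerate base: limb_bits = 0, mask = 0
theorem pv_loopA_b0 (cs : List Int) (carry : Int) (out : List Int) :
    pvLoopA 0 0 cs carry out = (out ++ List.replicate cs.length 0, pvVal 0 cs + carry) := by
  induction cs generalizing carry out with
  | nil => simp [pvLoopA, pvVal]
  | cons c cs ih =>
      simp [pvLoopA, ih, pvVal, List.replicate_succ, List.append_assoc]
      ring
-- ===== VERDICT (by name: the statement is the Claim_ definition above) =====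
theorem carry_propagate_py_spec : Claim_equal_carry_propagate_py := by
  intro coeffs limb_bits hdom hpre
  obtain ⟨hlb, hsgn, h0s⟩ := hpre
  have hmem : ∀ c ∈ coeffs, -2147483648 ≤ c ∧ c ≤ 2147483648 := by
    intro c hc
    unfold Dom_carry_propagate_py at hdom
    simp only [Bool.and_eq_true, List.all_eq_true] at hdom
    have := hdom.1 c hc
    rw [pvDomInt] at this
    exact of_decide_eq_true this
  have hT : 0 ≤ pvVal limb_bits.toNat coeffs := by
    by_cases hb1 : limb_bits.toNat = 0
    · rw [hb1, ← pv_sgn_zero]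
      exact hb1 ▸ hsgn
    · exact pv_sgn_nonneg _ (Nat.one_le_iff_ne_zero.mpr hb1) _ hmem hsgn
  have h0 : limb_bits = 0 → pvVal 0 coeffs = 0 := by
    intro h
    rw [← pv_sgn_zero]
    exact h0s h
  unfold Spec_carry_propagate_py carry_propagate_py carry_propagate_py_alt
  dsimp only
  set b := limb_bits.toNat with hbdef
  have hmask : ((1:Int) <<< b) - 1 = (2 ^ b : Int) - 1 := by
    rw [Int.shiftLeft_eq]; ring
  rw [pv_horner]
  by_cases hb0 : b = 0
  · -- limb_bits = 0 (Pre_ forces total = 0)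
    have hlb0 : limb_bits = 0 := by
      rw [hbdef] at hb0; omega
    have hv0 : pvVal 0 coeffs = 0 := h0 hlb0
    rw [hb0] at hT ⊢
    simp only [show ((1:Int) <<< (0:Nat) - 1) = 0 from by decide]
    rw [pv_loopA_b0]
    simp only [hv0, zero_add, Int.natAbs_zero, List.nil_append]
    rw [show pvPeelA 0 0 (0 + 1) 0 (List.replicate coeffs.length 0)
        = List.replicate coeffs.length 0 by rw [pvPeelA]; simp]
    rw [show (List.replicate coeffs.length (0:Int)) = [] ++ List.replicate coeffs.length 0 by simp]
    rw [pv_trim_pad coeffs.length [] (by simp)]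
    by_cases hc : coeffs = []
    · simp [hc]
    · have hn : coeffs.length ≠ 0 := by simpa using hc
      simp [hc, hn]
  · have hb : 0 < b := Nat.pos_of_ne_zero hb0
    simp only [hmask]
    rw [pv_loopA_eq]
    dsimp only
    simp only [List.nil_append]
    have hNn : (0:Int) < (2 ^ b : Int) ^ coeffs.length := by positivity
    set T := pvVal b coeffs + 0 with hTdef
    have hTeq : T = pvVal b coeffs := by rw [hTdef]; ring
    have hTnn : 0 ≤ T := by rw [hTeq]; exact hT
    have hcnn : 0 ≤ T / (2 ^ b : Int) ^ coeffs.length := Int.ediv_nonneg hTnn (le_of_lt hNn)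
    rw [pv_peelA_eq b hb _ _ _ hcnn (by omega)]
    rw [pv_low_append_dig b hb _ _ hTnn]
    rw [pv_trim_pad _ _ (pv_dig_last b T)]
    by_cases hc : coeffs = []
    · have hT0 : T = 0 := by rw [hTeq, hc]; rfl
      simp [hc, hT0, pvDig]
    · simp only [hc, if_false]
      by_cases hT0 : T = 0
      · have hd : pvDig b T = [] := by rw [hT0]; simp [pvDig]
        have hn : coeffs.length ≠ 0 := by simpa using hc
        have hv : pvVal b coeffs = 0 := by rw [← hTeq]; exact hT0
        simp [hd, hv, hn]
      · have hd : pvDig b T ≠ [] := by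
          have hnz : T.toNat ≠ 0 := by omega
          simp [pvDig, Nat.digits_ne_nil_iff_ne_zero, hnz]
        rw [if_neg hd, if_neg (hTeq ▸ hT0)]
        rw [pv_peelB_eq_peelA]
        rw [pv_peelA_eq b hb _ _ _ (hTeq ▸ hTnn) (by rw [← hTeq]; omega)]
        simp [hTeq]
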